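-- pv_equiv track=rewrite | github.com/mrek235/pyphi-with-intersections | pyphi/visualize.py | separate_cause_and_effect_for
-- ===== SOURCE A (Python) =====
-- def separate_cause_and_effect_for(coords):
--
--     causes_x = []
--     effects_x = []
--     causes_y = []
--     effects_y = []
--
--     for i in range(len(coords)):
--         if i % 2 == 0:
--             causes_x.append(coords[i][0])
--             causes_y.append(coords[i][1])
--         else:
--             effects_x.append(coords[i][0])
--             effects_y.append(coords[i][1])
--
--     return causes_x, causes_y, effects_x, effects_y
-- ===== SOURCE B (Python) =====
-- def separate_cause_and_effect_for(coords):
--     xs = [c[0] for c in coords]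
--     ys = [c[1] for c in coords]
--     return xs[::2], ys[::2], xs[1::2], ys[1::2]
-- ===== Notes on version B (the rewrite author's own statement) =====
-- stated objective: simpler
-- what changed: Replaces the single indexed loop with a parity test and four interleaved accumulators by a two-stage decomposition: transpose coords into full x/y columns, then partition each column by index parity with extended slices.
import Mathlib
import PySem

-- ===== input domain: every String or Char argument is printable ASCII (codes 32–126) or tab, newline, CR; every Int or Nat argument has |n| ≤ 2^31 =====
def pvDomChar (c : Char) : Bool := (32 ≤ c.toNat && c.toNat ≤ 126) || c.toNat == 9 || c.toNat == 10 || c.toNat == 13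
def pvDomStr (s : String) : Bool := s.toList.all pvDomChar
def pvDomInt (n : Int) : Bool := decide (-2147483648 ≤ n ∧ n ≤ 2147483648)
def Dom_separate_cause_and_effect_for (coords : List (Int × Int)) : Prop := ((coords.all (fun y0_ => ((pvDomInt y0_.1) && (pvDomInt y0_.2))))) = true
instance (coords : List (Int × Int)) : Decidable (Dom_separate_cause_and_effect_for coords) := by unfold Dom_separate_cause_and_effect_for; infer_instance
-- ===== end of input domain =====

-- B replaces A's single indexed loop (parity test, four interleaved accumulators) by a
-- two-stage decomposition: transpose into the x and y columns, then split each column by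
-- index parity with extended slices.

-- ===== PORT A =====
def separate_cause_and_effect_for (coords : List (Int × Int)) : List Int × List Int × List Int × List Int :=
  -- state: (causes_x, effects_x, causes_y, effects_y), appended exactly as A's loop does
  let r := (PySem.List.pyRange 0 coords.length 1).foldl
    (fun acc i =>
      if PySem.Int.mod i 2 = 0 then
        (acc.1 ++ [(PySem.List.pyGetD coords i (0, 0)).1], acc.2.1,
         acc.2.2.1 ++ [(PySem.List.pyGetD coords i (0, 0)).2], acc.2.2.2)
      else
        (acc.1, acc.2.1 ++ [(PySem.List.pyGetD coords i (0, 0)).1],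
         acc.2.2.1, acc.2.2.2 ++ [(PySem.List.pyGetD coords i (0, 0)).2]))
    ([], [], [], [])
  (r.1, r.2.2.1, r.2.1, r.2.2.2)

-- ===== PORT B =====
-- xs[::2] is PySem.List.slice? xs none none 2; the step is the literal 2 ≠ 0, so slice?
-- always returns some — .getD [] only discharges the Option.
def separate_cause_and_effect_for_alt (coords : List (Int × Int)) : List Int × List Int × List Int × List Int :=
  let xs := coords.map (fun c => c.1)
  let ys := coords.map (fun c => c.2)
  ((PySem.List.slice? xs none none 2).getD [],
   (PySem.List.slice? ys none none 2).getD [],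
   (PySem.List.slice? xs (some 1) none 2).getD [],
   (PySem.List.slice? ys (some 1) none 2).getD [])

-- ===== PRECONDITION & SPEC =====
def Spec_separate_cause_and_effect_for (coords : List (Int × Int)) (out : List Int × List Int × List Int × List Int) : Prop := out = separate_cause_and_effect_for_alt coords
instance (coords : List (Int × Int)) (out : List Int × List Int × List Int × List Int) : Decidable (Spec_separate_cause_and_effect_for coords out) := by unfold Spec_separate_cause_and_effect_for; infer_instance

-- ===== CLAIM (what is proved, stated in full; the proofs are below) =====
def Claim_equal_separate_cause_and_effect_for : Prop := ∀ (coords : List (Int × Int)), Dom_separate_cause_and_effect_for coords → Spec_separate_cause_and_effect_for coords (separate_cause_and_effect_for coords)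

-- ===== LEMMAS AND PROOFS =====

-- the even-indexed elements of a list
def pvEvens {α : Type} : List α → List α
  | [] => []
  | [x] => [x]
  | x :: _ :: rest => x :: pvEvens rest

theorem pvEvens_cons {α : Type} (x : α) (rest : List α) :
    pvEvens (x :: rest) = x :: pvEvens rest.tail := by
  cases rest <;> rfl

-- the filterMap/range form slice? computes, reduced to pvEvens
theorem pvG {α : Type} : ∀ (l : List α),
    List.filterMap (fun k => l[2 * k]?) (List.range ((l.length + 1) / 2)) = pvEvens l
  | [] => by simp [pvEvens]
  | [x] => by simp [pvEvens]
  | x :: y :: rest => by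
    have ih := pvG rest
    have h2 : ∀ k : Nat, (x :: y :: rest)[2 * (k + 1)]? = rest[2 * k]? := by
      intro k
      have hk : 2 * (k + 1) = 2 * k + 1 + 1 := by omega
      simp [hk]
    rw [show (x :: y :: rest).length = rest.length + 2 by simp,
        show (rest.length + 2 + 1) / 2 = (rest.length + 1) / 2 + 1 by omega,
        List.range_succ_eq_map, List.filterMap_cons, List.filterMap_map]
    simp only [Function.comp, Nat.succ_eq_add_one, h2, ih]
    simp [pvEvens]

theorem pvSlice2_zero {α : Type} (l : List α) :
    PySem.List.slice? l none none 2 = some (pvEvens l) := by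
  rw [← pvG l]
  simp only [PySem.List.slice?, PySem.List.sliceIndices]
  norm_num
  rw [show (if 0 < l.length then (((l.length : Int) + 2 - 1) / 2).toNat else 0)
      = (l.length + 1) / 2 from by split <;> omega]
  rfl

theorem pvSlice2_one {α : Type} (l : List α) :
    PySem.List.slice? l (some 1) none 2 = some (pvEvens l.tail) := by
  rw [← pvG l.tail]
  simp only [PySem.List.slice?, PySem.List.sliceIndices]
  norm_num
  have hs : (min (1 : Int) (l.length : Int)) = if l.length = 0 then 0 else 1 := by
    split <;> omega
  rw [hs]
  cases l with
  | nil => simp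
  | cons a t =>
    have hne : (a :: t).length = t.length + 1 := by simp
    rw [if_neg (by simp)]
    rw [show (if 1 < (a :: t).length then ((((a :: t).length : Int) - 1 + 2 - 1) / 2).toNat else 0)
        = ((a :: t).length - 1 + 1) / 2 from by
      rw [hne]; push_cast; split <;> omega]
    congr 1
    funext k
    rw [show ((1 : Int) + 2 * (k : Nat)).toNat = 2 * k + 1 from by omega]

-- the loop of A over enumerated coordinates, with generalized start index and accumulators
theorem pvLoop : ∀ (coords : List (Int × Int)) (s : Int) (cx ex cy ey : List Int),
    (PySem.List.enumerate coords s).foldl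
      (fun acc p =>
        if PySem.Int.mod p.1 2 = 0 then
          (acc.1 ++ [p.2.1], acc.2.1, acc.2.2.1 ++ [p.2.2], acc.2.2.2)
        else
          (acc.1, acc.2.1 ++ [p.2.1], acc.2.2.1, acc.2.2.2 ++ [p.2.2]))
      (cx, ex, cy, ey)
    = if PySem.Int.mod s 2 = 0 then
        (cx ++ pvEvens (coords.map Prod.fst), ex ++ pvEvens (coords.map Prod.fst).tail,
         cy ++ pvEvens (coords.map Prod.snd), ey ++ pvEvens (coords.map Prod.snd).tail)
      else
        (cx ++ pvEvens (coords.map Prod.fst).tail, ex ++ pvEvens (coords.map Prod.fst),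
         cy ++ pvEvens (coords.map Prod.snd).tail, ey ++ pvEvens (coords.map Prod.snd))
  | [], s, cx, ex, cy, ey => by
    simp [PySem.List.enumerate_nil, pvEvens]
  | c :: rest, s, cx, ex, cy, ey => by
    have ih := pvLoop rest (s + 1)
    rw [PySem.List.enumerate_cons, List.foldl_cons]
    have hmod : PySem.Int.mod s 2 = s % 2 := PySem.Int.mod_eq_emod_of_pos (by norm_num)
    have hmod1 : PySem.Int.mod (s + 1) 2 = (s + 1) % 2 :=
      PySem.Int.mod_eq_emod_of_pos (by norm_num)
    by_cases h : s % 2 = 0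
    · rw [if_pos (by rw [hmod]; exact h)]
      simp only [ih, hmod1]
      rw [if_neg (by omega), if_pos (by rw [hmod]; exact h)]
      simp [pvEvens_cons, List.append_assoc]
    · rw [if_neg (by rw [hmod]; exact h)]
      simp only [ih, hmod1]
      rw [if_pos (by omega), if_neg (by rw [hmod]; exact h)]
      simp [pvEvens_cons, List.append_assoc]

-- A computed in closed form
theorem pvA_eq (coords : List (Int × Int)) :
    separate_cause_and_effect_for coords
      = (pvEvens (coords.map Prod.fst), pvEvens (coords.map Prod.snd),
         pvEvens (coords.map Prod.fst).tail, pvEvens (coords.map Prod.snd).tail) := by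
  unfold separate_cause_and_effect_for
  rw [show (PySem.List.pyRange 0 (coords.length : Int) 1).foldl
      (fun (acc : List Int × List Int × List Int × List Int) i =>
        if PySem.Int.mod i 2 = 0 then
          (acc.1 ++ [(PySem.List.pyGetD coords i (0, 0)).1], acc.2.1,
           acc.2.2.1 ++ [(PySem.List.pyGetD coords i (0, 0)).2], acc.2.2.2)
        else
          (acc.1, acc.2.1 ++ [(PySem.List.pyGetD coords i (0, 0)).1],
           acc.2.2.1, acc.2.2.2 ++ [(PySem.List.pyGetD coords i (0, 0)).2]))
      ([], [], [], [])
      = (PySem.List.enumerate coords 0).foldl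
      (fun acc p =>
        if PySem.Int.mod p.1 2 = 0 then
          (acc.1 ++ [p.2.1], acc.2.1, acc.2.2.1 ++ [p.2.2], acc.2.2.2)
        else
          (acc.1, acc.2.1 ++ [p.2.1], acc.2.2.1, acc.2.2.2 ++ [p.2.2]))
      ([], [], [], []) from by
        rw [PySem.List.enumerate_eq_map_pyRange coords ((0 : Int), (0 : Int)), List.foldl_map]
        rfl]
  rw [pvLoop coords 0 [] [] [] []]
  simp [PySem.Int.mod]

-- ===== VERDICT (by name: the statement is the Claim_ definition above) =====
theorem separate_cause_and_effect_for_spec : Claim_equal_separate_cause_and_effect_for := by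
  intro coords _
  unfold Spec_separate_cause_and_effect_for separate_cause_and_effect_for_alt
  rw [pvA_eq]
  simp only [pvSlice2_zero, pvSlice2_one, Option.getD_some]
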